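-- pv_equiv track=rewrite | github.com/dcl5255/Codility-Lessons | Lessons/7-Stacks and Queues/StoneWall.py | first_solution
-- ===== SOURCE A (Python) =====
-- from collections import deque
--
-- def add_to_blocks(blocks, new_blocks):
--     while new_blocks:
--         blocks.append(new_blocks.pop())
--
-- def block_found(blocks, current):
--     removed = deque()
--
--     while blocks:
--         last_block = blocks.pop()
--         removed.append(last_block)
--         if current == last_block:
--             add_to_blocks(blocks, removed)
--             return True
--         if current < last_block:
--             continue
--         if current > last_block:
--             add_to_blocks(blocks, removed)
--             return False
--     return False
--
-- def first_solution(H): # Bad solution, but the idea was there... reworked in solution(H)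
--     blocks = deque()
--     count = 0
--
--     for i in H:
--         if not block_found(blocks, i):
--             blocks.append(i)
--             count += 1
--
--     return count
-- ===== SOURCE B (Python) =====
-- from bisect import bisect_left
--
-- def first_solution(H):
--     # Strictly increasing list of the "visible" block heights (the right-to-left
--     # strict minima of A's accumulated deque); membership is decided by binary
--     # search instead of A's pop-and-restore scan.
--     stack = []
--     count = 0
--     for h in H:
--         i = bisect_left(stack, h)
--         if i < len(stack) and stack[i] == h:
--             continue
--         del stack[i:]
--         stack.append(h)
--         count += 1
--     return count
-- ===== Notes on version B (the rewrite author's own statement) =====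
-- stated objective: faster
-- what changed: Replaces A's pop-and-restore deque scan (which re-walks and re-pushes the accumulated blocks on every height) with a persistent strictly increasing stack of right-to-left strict minima queried by binary search; a height is reused iff it is a member of that stack.
import Mathlib
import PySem

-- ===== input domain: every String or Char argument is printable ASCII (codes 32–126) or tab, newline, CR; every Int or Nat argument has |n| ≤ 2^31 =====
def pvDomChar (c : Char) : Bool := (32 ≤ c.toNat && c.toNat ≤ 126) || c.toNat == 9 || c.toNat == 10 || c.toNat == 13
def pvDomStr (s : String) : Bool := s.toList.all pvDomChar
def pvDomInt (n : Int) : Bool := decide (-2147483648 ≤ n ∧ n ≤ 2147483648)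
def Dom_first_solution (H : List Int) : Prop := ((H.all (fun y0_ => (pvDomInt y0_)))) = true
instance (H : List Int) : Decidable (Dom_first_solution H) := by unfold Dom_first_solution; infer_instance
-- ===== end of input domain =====

-- B replaces A's O(n^2) pop-and-restore deque scan by a persistent strictly
-- increasing stack queried by binary search (O(n log n)); return values agree on all inputs.

-- ===== PORT A =====
-- blocks/removed are deques used as stacks (append/pop at the right); we keep them
-- as Lists with the HEAD as the top (the popping end), so Python's pop() = head,
-- append(x) = cons x.  add_to_blocks pops new_blocks from its right (= getLast).
def addToBlocks (blocks newBlocks : List Int) : List Int :=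
  if hne : newBlocks = [] then blocks
  else addToBlocks (newBlocks.getLast hne :: blocks) newBlocks.dropLast
termination_by newBlocks.length
decreasing_by
  have := List.length_pos_of_ne_nil hne
  simp [List.length_dropLast]; omega

-- the while-loop of block_found; `removed` grows at its right end (append [last])
def blockFoundGo (current : Int) (blocks removed : List Int) : Bool × List Int :=
  match blocks with
  | [] => (false, [])
  | last :: rest =>
    let removed' := removed ++ [last]
    if current = last then (true, addToBlocks rest removed')
    else if current < last then blockFoundGo current rest removed'
    else (false, addToBlocks rest removed')

-- block_found mutates `blocks`; we return (result, new blocks)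
def blockFound (blocks : List Int) (current : Int) : Bool × List Int :=
  blockFoundGo current blocks []

def first_solution (H : List Int) : Int :=
  (H.foldl (fun st i =>
      let r := blockFound st.1 i
      if r.1 then (r.2, st.2) else (i :: r.2, st.2 + 1)) (([] : List Int), (0 : Int))).2

-- ===== PORT B =====
-- bisect.bisect_left on a sorted list = number of elements < h (stdlib contract)
def bisectLeft (stack : List Int) (h : Int) : Nat :=
  (stack.takeWhile (fun x => decide (x < h))).length

def first_solution_alt (H : List Int) : Int :=
  (H.foldl (fun st h =>
      let stack := st.1
      let i := bisectLeft stack h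
      if stack[i]? = some h then st                    -- i < len(stack) and stack[i] == h
      else (stack.take i ++ [h], st.2 + 1)             -- del stack[i:]; stack.append(h)
    ) (([] : List Int), (0 : Int))).2

-- ===== PRECONDITION & SPEC =====
def Spec_first_solution (H : List Int) (out : Int) : Prop := out = first_solution_alt H
instance (H : List Int) (out : Int) : Decidable (Spec_first_solution H out) := by unfold Spec_first_solution; infer_instance

-- ===== CLAIM (what is proved, stated in full; the proofs are below) =====
def Claim_equal_first_solution : Prop := ∀ (H : List Int), Dom_first_solution H → Spec_first_solution H (first_solution H)

-- ===== LEMMAS AND PROOFS =====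

-- right-to-left strict minima of A's blocks (head = top): the elements smaller
-- than everything above them; these are exactly what B's stack stores (reversed).
def cands : List Int → List Int
  | [] => []
  | b :: rest => b :: (cands rest).filter (fun x => decide (x < b))

theorem addToBlocks_eq (blocks new : List Int) : addToBlocks blocks new = new ++ blocks := by
  fun_induction addToBlocks with
  | case1 bl => simp
  | case2 bl nb hne ih =>
    rw [ih]
    conv_rhs => rw [← List.dropLast_concat_getLast hne]
    simp

theorem blockFoundGo_spec (h : Int) (blocks removed : List Int) :
    blockFoundGo h blocks removed =
      match blocks.dropWhile (fun b => decide (h < b)) with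
      | [] => (false, [])
      | b :: _ => (decide (b = h), removed ++ blocks) := by
  induction blocks generalizing removed with
  | nil => simp [blockFoundGo]
  | cons b rest ih =>
    by_cases hb : h < b
    · have hbne : ¬ (h = b) := by omega
      simp only [blockFoundGo, if_neg hbne, if_pos hb, List.dropWhile_cons,
        decide_eq_true hb]
      rw [ih]
      cases hdr : rest.dropWhile (fun b => decide (h < b)) with
      | nil => simp
      | cons c t => simp
    · by_cases he : h = b
      · subst he
        simp [blockFoundGo, addToBlocks_eq]
      · have hlt : b < h := by omega
        have hne2 : ¬ (b = h) := by omega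
        simp [blockFoundGo, he, hb, addToBlocks_eq, hne2]

theorem cands_subset {x : Int} : ∀ {L : List Int}, x ∈ cands L → x ∈ L := by
  intro L
  induction L with
  | nil => simp [cands]
  | cons b rest ih =>
    intro hx
    simp only [cands, List.mem_cons] at hx ⊢
    rcases hx with h | h
    · exact Or.inl h
    · exact Or.inr (ih (List.mem_of_mem_filter h))

theorem cands_sorted : ∀ (L : List Int), (cands L).Pairwise (fun a b => b < a) := by
  intro L
  induction L with
  | nil => simp [cands]
  | cons b rest ih =>
    simp only [cands]
    refine List.Pairwise.cons ?_ (ih.filter _)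
    intro x hx
    have := List.of_mem_filter hx
    simpa using this

-- head? of dropWhile is unchanged by removing elements the predicate would drop anyway
theorem head_dropWhile_filter {α : Type} (p q : α → Bool) (l : List α)
    (H : ∀ x ∈ l, q x = false → p x = true) :
    ((l.filter q).dropWhile p).head? = (l.dropWhile p).head? := by
  induction l with
  | nil => simp
  | cons a l ih =>
    have ih' := ih (fun x hx => H x (List.mem_cons_of_mem _ hx))
    by_cases hq : q a
    · by_cases hp : p a
      · simp [List.filter_cons, hq, List.dropWhile_cons, hp, ih']
      · simp [List.filter_cons, hq, List.dropWhile_cons, hp]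
    · have hp : p a = true := H a (List.mem_cons_self) (by simpa using hq)
      simp [List.filter_cons, hq, List.dropWhile_cons, hp, ih']

-- the first block ≤ h (from the top) is the same in blocks and in its strict minima
theorem head_dropWhile_cands (h : Int) (L : List Int) :
    ((cands L).dropWhile (fun b => decide (h < b))).head? =
      (L.dropWhile (fun b => decide (h < b))).head? := by
  induction L with
  | nil => simp [cands]
  | cons b rest ih =>
    by_cases hb : h < b
    · simp only [cands, List.dropWhile_cons, decide_eq_true hb, if_true]
      rw [head_dropWhile_filter, ih]
      intro x hx hxb
      simp at hxb ⊢
      omega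
    · simp [cands, List.dropWhile_cons, hb]

-- on a strictly decreasing list, "first element ≤ h equals h" ⟺ membership
theorem dec_mem (h : Int) : ∀ (D : List Int), D.Pairwise (fun a b => b < a) →
    (((D.dropWhile (fun b => decide (h < b))).head? = some h) ↔ h ∈ D) := by
  intro D
  induction D with
  | nil => simp
  | cons b rest ih =>
    intro hp
    have hlt : ∀ x ∈ rest, x < b := by
      intro x hx; exact (List.pairwise_cons.mp hp).1 x hx
    have hrest := ih (List.pairwise_cons.mp hp).2
    by_cases hb : h < b
    · have : ¬ (h = b) := by omega
      simp [List.dropWhile_cons, hb, hrest, this]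
    · have hnotrest : h ∉ rest := by
        intro hx; have := hlt h hx; omega
      constructor
      · intro hh
        simp [List.dropWhile_cons, hb] at hh
        simp [hh]
      · intro hh
        rcases List.mem_cons.mp hh with he | he
        · simp [List.dropWhile_cons, hb, he]
        · exact absurd he hnotrest
  
-- on a strictly increasing list, same characterisation with (· < h)
theorem inc_mem (h : Int) : ∀ (S : List Int), S.Pairwise (fun a b => a < b) →
    (((S.dropWhile (fun b => decide (b < h))).head? = some h) ↔ h ∈ S) := by
  intro S
  induction S with
  | nil => simp
  | cons b rest ih =>
    intro hp
    have hlt : ∀ x ∈ rest, b < x := by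
      intro x hx; exact (List.pairwise_cons.mp hp).1 x hx
    have hrest := ih (List.pairwise_cons.mp hp).2
    by_cases hb : b < h
    · have : ¬ (h = b) := by omega
      simp [List.dropWhile_cons, hb, hrest, this]
    · have hnotrest : h ∉ rest := by
        intro hx; have := hlt h hx; omega
      constructor
      · intro hh
        simp [List.dropWhile_cons, hb] at hh
        simp [hh]
      · intro hh
        rcases List.mem_cons.mp hh with he | he
        · simp [List.dropWhile_cons, hb, he]
        · exact absurd he hnotrest

-- on a strictly increasing list takeWhile (< h) = filter (< h)
theorem inc_takeWhile_filter (h : Int) : ∀ (S : List Int), S.Pairwise (fun a b => a < b) →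
    S.takeWhile (fun x => decide (x < h)) = S.filter (fun x => decide (x < h)) := by
  intro S
  induction S with
  | nil => simp
  | cons b rest ih =>
    intro hp
    have hlt : ∀ x ∈ rest, b < x := (List.pairwise_cons.mp hp).1
    by_cases hb : b < h
    · simp [List.takeWhile_cons, List.filter_cons, hb, ih (List.pairwise_cons.mp hp).2]
    · have : rest.filter (fun x => decide (x < h)) = [] := by
        rw [List.filter_eq_nil_iff]
        intro x hx
        have := hlt x hx
        simp; omega
      simp [List.takeWhile_cons, List.filter_cons, hb, this]

theorem drop_length_takeWhile {α : Type} (p : α → Bool) (l : List α) :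
    l.drop (l.takeWhile p).length = l.dropWhile p := by
  induction l with
  | nil => simp
  | cons a l ih =>
    by_cases hp : p a <;>
      simp [List.takeWhile_cons, List.dropWhile_cons, hp, ih]

theorem take_length_takeWhile {α : Type} (p : α → Bool) (l : List α) :
    l.take (l.takeWhile p).length = l.takeWhile p := by
  induction l with
  | nil => simp
  | cons a l ih =>
    by_cases hp : p a <;>
      simp [List.takeWhile_cons, hp, ih]

theorem filter_reverse_comm {α : Type} (p : α → Bool) (l : List α) :
    l.reverse.filter p = (l.filter p).reverse := by
  simp [List.filter_reverse]

-- one step of the two folds preserves: equal counts, stack = (cands blocks).reverse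
theorem step_eq (blocks : List Int) (c : Int) (h : Int) :
    (fun st h =>
      let stack := st.1
      let i := bisectLeft stack h
      if stack[i]? = some h then st
      else (stack.take i ++ [h], st.2 + 1)) ((cands blocks).reverse, c) h
    = (((cands ((fun st i =>
        let r := blockFound st.1 i
        if r.1 then (r.2, st.2) else (i :: r.2, st.2 + 1)) (blocks, c) h).1).reverse),
       ((fun st i =>
        let r := blockFound st.1 i
        if r.1 then (r.2, st.2) else (i :: r.2, st.2 + 1)) (blocks, c) h).2) := by
  have hD := cands_sorted blocks
  have hS : ((cands blocks).reverse).Pairwise (fun a b => a < b) := by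
    rw [List.pairwise_reverse]; exact hD
  -- B's test equals membership of h in cands blocks
  have hdrop : ((cands blocks).reverse).drop (bisectLeft ((cands blocks).reverse) h)
      = ((cands blocks).reverse).dropWhile (fun x => decide (x < h)) := by
    unfold bisectLeft
    exact drop_length_takeWhile _ _
  have hBtest : (((cands blocks).reverse)[bisectLeft ((cands blocks).reverse) h]? = some h)
      ↔ h ∈ cands blocks := by
    rw [← List.head?_drop, hdrop, inc_mem h _ hS, List.mem_reverse]
  -- A's found flag
  have hA := blockFoundGo_spec h blocks []
  have hAmem : (((blocks.dropWhile (fun b => decide (h < b))).head? = some h)) ↔ h ∈ cands blocks := by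
    rw [← head_dropWhile_cands, dec_mem h _ hD]
  by_cases hmem : h ∈ cands blocks
  · -- found: both sides leave the state unchanged
    have hhead : (blocks.dropWhile (fun b => decide (h < b))).head? = some h := hAmem.mpr hmem
    cases hdw : blocks.dropWhile (fun b => decide (h < b)) with
    | nil => rw [hdw] at hhead; simp at hhead
    | cons b t =>
      rw [hdw] at hhead
      have hbh : b = h := by simpa using hhead
      have : blockFound blocks h = (true, blocks) := by
        unfold blockFound; rw [hA, hdw]; simp [hbh]
      simp only [this, hBtest.mpr hmem]
      simp
  · -- not found: count+1, new stack = filter (< h) ++ [h] on both sides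
    have hnB : ¬ (((cands blocks).reverse)[bisectLeft ((cands blocks).reverse) h]? = some h) := by
      rw [hBtest]; exact hmem
    have htake : ((cands blocks).reverse).take (bisectLeft ((cands blocks).reverse) h)
        = ((cands blocks).reverse).takeWhile (fun x => decide (x < h)) := by
      unfold bisectLeft
      exact take_length_takeWhile _ _
    have htw := inc_takeWhile_filter h _ hS
    cases hdw : blocks.dropWhile (fun b => decide (h < b)) with
    | nil =>
      -- every block > h: A clears blocks then appends h; B's stack has no element < h
      have hall : ∀ x ∈ blocks, h < x := by
        have := List.dropWhile_eq_nil_iff.mp hdw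
        intro x hx; have := this x hx; simpa using this
      have : blockFound blocks h = (false, []) := by
        unfold blockFound; rw [hA, hdw]
      simp only [this, hnB, if_neg, if_false]
      have hfilt : ((cands blocks).reverse).filter (fun x => decide (x < h)) = [] := by
        rw [List.filter_eq_nil_iff]
        intro x hx
        have hxb := cands_subset (List.mem_reverse.mp hx)
        have := hall x hxb
        simp; omega
      simp [htake, htw, hfilt, cands]
    | cons b t =>
      have hble : ¬ (h < b) := by
        have := List.head?_dropWhile_not (p := fun b => decide (h < b)) (l := blocks)
        rw [hdw] at this; simpa using this
      have hbne : ¬ (b = h) := by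
        intro he
        apply hmem
        apply hAmem.mp
        rw [hdw, he]
        rfl
      have : blockFound blocks h = (false, blocks) := by
        unfold blockFound; rw [hA, hdw]; simp [hbne]
      simp only [this, hnB, if_neg, if_false]
      have : cands (h :: blocks) = h :: (cands blocks).filter (fun x => decide (x < h)) := rfl
      simp [this, htake, htw, filter_reverse_comm]

theorem fold_rel (H : List Int) : ∀ (blocks : List Int) (c : Int),
    (H.foldl (fun st h =>
      let stack := st.1
      let i := bisectLeft stack h
      if stack[i]? = some h then st
      else (stack.take i ++ [h], st.2 + 1)) ((cands blocks).reverse, c)).2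
    = (H.foldl (fun st i =>
        let r := blockFound st.1 i
        if r.1 then (r.2, st.2) else (i :: r.2, st.2 + 1)) (blocks, c)).2 := by
  induction H with
  | nil => intro blocks c; rfl
  | cons h t ih =>
    intro blocks c
    show (List.foldl (fun st h =>
        let stack := st.1
        let i := bisectLeft stack h
        if stack[i]? = some h then st
        else (stack.take i ++ [h], st.2 + 1))
      ((fun st h =>
        let stack := st.1
        let i := bisectLeft stack h
        if stack[i]? = some h then st
        else (stack.take i ++ [h], st.2 + 1)) ((cands blocks).reverse, c) h) t).2
      = (List.foldl (fun st i =>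
        let r := blockFound st.1 i
        if r.1 then (r.2, st.2) else (i :: r.2, st.2 + 1))
      ((fun st i =>
        let r := blockFound st.1 i
        if r.1 then (r.2, st.2) else (i :: r.2, st.2 + 1)) (blocks, c) h) t).2
    rw [step_eq]
    exact ih _ _

-- ===== VERDICT (by name: the statement is the Claim_ definition above) =====
theorem first_solution_spec : Claim_equal_first_solution := by
  intro H _
  unfold Spec_first_solution first_solution first_solution_alt
  have := fold_rel H [] 0
  simpa [cands] using this.symm
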